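-- pv_equiv track=rewrite | github.com/AML14/tratto | data-augmentation/scripts/convert.py | remove_java_extension
-- ===== SOURCE A (Python) =====
-- def remove_java_extension(input_string):
--     input_list = input_string.split(" ")
--     new_input_list = []
--     for input in input_list:
--         # Check if the string ends with ".java"
--         if input.endswith(".java"):
--             # Remove the ".java" extension
--             new_input_list.append(input[: -len(".java")])
--         else:
--             # If the string does not end with ".java", return it unchanged
--             new_input_list.append(input)
--     return " ".join(new_input_list)
-- ===== SOURCE B (Python) =====
-- def remove_java_extension(input_string):
--     # One left-to-right pass over the characters: drop ".java" exactly where a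
--     # token (space-delimited) ends with it; no split/join of a token list.
--     out = []
--     i = 0
--     n = len(input_string)
--     while i < n:
--         if input_string.startswith(".java", i) and (i + 5 == n or input_string[i + 5] == " "):
--             i += 5
--         else:
--             out.append(input_string[i])
--             i += 1
--     return "".join(out)
-- ===== Notes on version B (the rewrite author's own statement) =====
-- stated objective: alternative
-- what changed: Replaced split-on-space / per-token endswith loop / join with a single character-level scan of the whole string that skips '.java' occurrences immediately followed by a space or the end of the string.
import Mathlib
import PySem

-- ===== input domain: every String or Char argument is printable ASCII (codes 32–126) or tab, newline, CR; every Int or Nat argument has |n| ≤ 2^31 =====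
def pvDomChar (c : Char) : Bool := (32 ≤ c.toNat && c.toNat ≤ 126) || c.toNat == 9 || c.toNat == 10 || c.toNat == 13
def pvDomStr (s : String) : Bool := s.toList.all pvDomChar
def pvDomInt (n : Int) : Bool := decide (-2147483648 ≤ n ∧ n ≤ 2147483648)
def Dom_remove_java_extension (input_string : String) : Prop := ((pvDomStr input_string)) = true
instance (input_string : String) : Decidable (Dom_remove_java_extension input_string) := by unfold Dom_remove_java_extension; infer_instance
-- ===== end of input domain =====

-- B replaces the split-on-space / per-token endswith loop / join with a single character-level scan; objective: alternative (same cost).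

-- ===== PORT A =====
def remove_java_extension (input_string : String) : String :=
  let input_list := (PySem.Str.split? input_string " ").getD []
  let new_input_list := input_list.foldl (fun acc inp =>
    if PySem.Str.endswith inp ".java" then
      acc ++ [PySem.Str.slice inp none (some (-5))]
    else
      acc ++ [inp]) []
  PySem.Str.join " " new_input_list

-- ===== PORT B =====
-- the while-loop of Source B: skip ".java" when followed by a space or the end, else copy one char
def altScan (cs : List Char) : List Char :=
  match cs with
  | [] => []
  | c :: rest =>
    if (c :: rest).take 5 = ['.', 'j', 'a', 'v', 'a'] ∧
        (rest.drop 4 = [] ∨ (rest.drop 4).head? = some ' ') then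
      altScan (rest.drop 4)
    else
      c :: altScan rest
termination_by cs.length
decreasing_by
  · simp only [List.length_cons, List.length_drop]; omega
  · simp

def remove_java_extension_alt (input_string : String) : String :=
  String.ofList (altScan input_string.toList)

-- ===== PRECONDITION & SPEC =====
def Spec_remove_java_extension (input_string : String) (out : String) : Prop := out = remove_java_extension_alt input_string
instance (input_string : String) (out : String) : Decidable (Spec_remove_java_extension input_string out) := by unfold Spec_remove_java_extension; infer_instance

-- ===== CLAIM (what is proved, stated in full; the proofs are below) =====
def Claim_equal_remove_java_extension : Prop := ∀ (input_string : String), Dom_remove_java_extension input_string → Spec_remove_java_extension input_string (remove_java_extension input_string)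

-- ===== LEMMAS AND PROOFS =====

-- structural characterisation of Python's split(" ")
def mySplit : List Char → List (List Char)
  | [] => [[]]
  | c :: rest => if c = ' ' then [] :: mySplit rest else (mySplit rest).modifyHead (c :: ·)

theorem mySplit_ne_nil (s : List Char) : mySplit s ≠ [] := by
  induction s with
  | nil => simp [mySplit]
  | cons c rest ih =>
    simp only [mySplit]
    split_ifs
    · simp
    · cases h : mySplit rest with
      | nil => exact absurd h ih
      | cons a l => simp

theorem go_step_nil (f : Nat) (cur : List Char) (acc : List (List Char)) :
    PySem.Chars.splitOn.go [' '] (f+1) [] cur acc = (cur.reverse :: acc).reverse := by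
  rw [PySem.Chars.splitOn.go]; omega

theorem go_step_space (f : Nat) (rest cur : List Char) (acc : List (List Char)) :
    PySem.Chars.splitOn.go [' '] (f+1) (' '::rest) cur acc =
      PySem.Chars.splitOn.go [' '] f rest [] (cur.reverse :: acc) := by
  rw [PySem.Chars.splitOn.go]
  simp [List.isPrefixOf]

theorem go_step_char (f : Nat) (c : Char) (rest cur : List Char) (acc : List (List Char))
    (hc : c ≠ ' ') :
    PySem.Chars.splitOn.go [' '] (f+1) (c::rest) cur acc =
      PySem.Chars.splitOn.go [' '] f rest (c :: cur) acc := by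
  rw [PySem.Chars.splitOn.go]
  simp [List.isPrefixOf]
  intro h; exact (hc h.symm).elim

theorem splitOn_go_eq (fuel : Nat) (l cur : List Char) (acc : List (List Char))
    (h : l.length < fuel) :
    PySem.Chars.splitOn.go [' '] fuel l cur acc =
      acc.reverse ++ (cur.reverse ++ (mySplit l).headI) :: (mySplit l).tail := by
  induction fuel generalizing l cur acc with
  | zero => omega
  | succ f ih =>
    cases l with
    | nil =>
      rw [go_step_nil]
      simp [mySplit]
    | cons c rest =>
      by_cases hc : c = ' '
      · subst hc
        rw [go_step_space, ih rest [] (cur.reverse :: acc) (by simp at h ⊢; omega)]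
        cases hm : mySplit rest with
        | nil => exact absurd hm (mySplit_ne_nil rest)
        | cons a l => simp [mySplit, hm]
      · rw [go_step_char f c rest cur acc hc, ih rest (c :: cur) acc (by simp at h ⊢; omega)]
        cases hm : mySplit rest with
        | nil => exact absurd hm (mySplit_ne_nil rest)
        | cons a l => simp [mySplit, hm, hc]

theorem splitOn_eq_mySplit (s : List Char) :
    PySem.Chars.splitOn s [' '] = mySplit s := by
  unfold PySem.Chars.splitOn
  rw [splitOn_go_eq (s.length + 1) s [] [] (by omega)]
  cases h : mySplit s with
  | nil => exact absurd h (mySplit_ne_nil s)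
  | cons a l => simp

theorem mySplit_headI (r : List Char) :
    (mySplit r).headI = r.takeWhile (fun x => x ≠ ' ') := by
  induction r with
  | nil => simp [mySplit]
  | cons c rest ih =>
    by_cases hc : c = ' '
    · subst hc; simp [mySplit]
    · cases hm : mySplit rest with
      | nil => exact absurd hm (mySplit_ne_nil rest)
      | cons a l =>
        simp [mySplit, hc, hm] at ih ⊢
        exact ih

theorem dropWhile_space_shape (r : List Char) :
    r.dropWhile (fun x => x ≠ ' ') = [] ∨
      ∃ u, r.dropWhile (fun x => x ≠ ' ') = ' ' :: u := by
  induction r with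
  | nil => left; simp
  | cons c rest ih =>
    by_cases hc : c = ' '
    · subst hc; right; exact ⟨rest, by simp⟩
    · simpa [List.dropWhile_cons, hc] using ih

-- A's per-token transformation, on char lists
def fA (t : List Char) : List Char :=
  if PySem.Chars.endswith t ['.', 'j', 'a', 'v', 'a'] then t.take (t.length - 5) else t

theorem fA_nil : fA [] = [] := by decide

def Jfun (s : List Char) : List Char := PySem.Chars.join [' '] ((mySplit s).map fA)

theorem join_cons_head (c : Char) (x : List Char) (L : List (List Char)) :
    PySem.Chars.join [' '] ((c :: x) :: L) = c :: PySem.Chars.join [' '] (x :: L) := by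
  cases L with
  | nil => simp [PySem.Chars.join_singleton]
  | cons y L' => simp [PySem.Chars.join_cons_cons]

theorem J_space (u : List Char) : Jfun (' ' :: u) = ' ' :: Jfun u := by
  unfold Jfun
  cases hm : mySplit u with
  | nil => exact absurd hm (mySplit_ne_nil u)
  | cons a l => simp [mySplit, hm, fA_nil, PySem.Chars.join_cons_cons]

theorem endswith_cons_of (c : Char) (a : List Char)
    (h : PySem.Chars.endswith a ['.', 'j', 'a', 'v', 'a'] = true) :
    PySem.Chars.endswith (c :: a) ['.', 'j', 'a', 'v', 'a'] = true := by
  rw [PySem.Chars.endswith_iff] at h ⊢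
  obtain ⟨u, hu⟩ := h
  exact ⟨c :: u, by simp [← hu]⟩

theorem suffix_drop_cons (c : Char) (a : List Char)
    (h : PySem.Chars.endswith (c :: a) ['.', 'j', 'a', 'v', 'a'] = true)
    (hlen : 5 ≤ a.length) :
    PySem.Chars.endswith a ['.', 'j', 'a', 'v', 'a'] = true := by
  rw [PySem.Chars.endswith_iff] at h ⊢
  obtain ⟨u, hu⟩ := h
  cases u with
  | nil =>
    have := congrArg List.length hu
    simp at this
    omega
  | cons x u' =>
    exact ⟨u', by injection hu with _ h2⟩

-- the key head-token step: when the scan condition fails at a non-space head char,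
-- A's transformed join also just moves the head char through
theorem J_cons (c : Char) (rest : List Char) (hc : c ≠ ' ')
    (hC : ¬((c :: rest).take 5 = ['.', 'j', 'a', 'v', 'a'] ∧
        (rest.drop 4 = [] ∨ (rest.drop 4).head? = some ' '))) :
    Jfun (c :: rest) = c :: Jfun rest := by
  cases hm : mySplit rest with
  | nil => exact absurd hm (mySplit_ne_nil rest)
  | cons a l =>
    have hfa : fA (c :: a) = c :: fA a := by
      by_cases he : PySem.Chars.endswith (c :: a) ['.', 'j', 'a', 'v', 'a'] = true
      · -- c::a ends with ".java"
        have hlen5 : 5 ≤ (c :: a).length := by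
          rw [PySem.Chars.endswith_iff] at he
          have := he.length_le
          simpa using this
        by_cases hl : a.length = 4
        · -- c::a IS ".java": then the scan condition would have held — contradiction
          exfalso
          have hca : c :: a = ['.', 'j', 'a', 'v', 'a'] := by
            rw [PySem.Chars.endswith_iff] at he
            obtain ⟨u, hu⟩ := he
            have hu0 : u = [] := by
              have := congrArg List.length hu
              simp at this
              simpa using List.eq_nil_of_length_eq_zero (by omega)
            simpa [hu0] using hu.symm
          -- a is the space-free prefix of rest
          have ha : a = rest.takeWhile (fun x => x ≠ ' ') := by
            have := mySplit_headI rest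
            rw [hm] at this
            simpa using this
          have hrest : rest = a ++ rest.dropWhile (fun x => x ≠ ' ') := by
            rw [ha]; exact (List.takeWhile_append_dropWhile).symm
          have ha4 : a = ['j', 'a', 'v', 'a'] := by
            injection hca with h1 h2
          apply hC
          constructor
          · rw [hrest, ha4]
            injection hca with h1 _
            subst h1
            simp
          · rcases dropWhile_space_shape rest with hd | ⟨u, hd⟩
            · left
              rw [hrest, ha4, hd]
              simp
            · right
              rw [hrest, ha4, hd]
              simp
        · have hlen : 5 ≤ a.length := by simp at hlen5; omega
          have he' := suffix_drop_cons c a he hlen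
          have : (c :: a).length - 5 = (a.length - 5) + 1 := by simp; omega
          simp only [fA, he, he', if_pos, this, List.take_succ_cons]
      · have he' : PySem.Chars.endswith a ['.', 'j', 'a', 'v', 'a'] = false := by
          rcases Bool.eq_false_or_eq_true (PySem.Chars.endswith a ['.', 'j', 'a', 'v', 'a']) with h | h
          · exact absurd (endswith_cons_of c a h) he
          · exact h
        simp only [fA, he', Bool.not_eq_true] at he ⊢
        rw [if_neg (by simp [he]), if_neg (by simp)]
    unfold Jfun
    simp only [mySplit, if_neg hc, hm, List.modifyHead, List.map_cons, hfa]
    exact join_cons_head c (fA a) (l.map fA)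

theorem fA_java : fA ['.', 'j', 'a', 'v', 'a'] = [] := by decide

theorem mySplit_java_append (u : List Char) :
    mySplit (['.', 'j', 'a', 'v', 'a'] ++ ' ' :: u) = ['.', 'j', 'a', 'v', 'a'] :: mySplit u := by
  cases hm : mySplit u with
  | nil => exact absurd hm (mySplit_ne_nil u)
  | cons a l => simp [mySplit, hm]

theorem J_java (t : List Char) (h : t = [] ∨ t.head? = some ' ') :
    Jfun (['.', 'j', 'a', 'v', 'a'] ++ t) = Jfun t := by
  rcases h with h | h
  · subst h
    decide
  · cases t with
    | nil => simp at h
    | cons x u =>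
      have hx : x = ' ' := by simpa using h
      subst hx
      unfold Jfun
      rw [mySplit_java_append]
      cases hm : mySplit u with
      | nil => exact absurd hm (mySplit_ne_nil u)
      | cons a l =>
        simp [mySplit, hm, fA_java, fA_nil, PySem.Chars.join_cons_cons]

theorem altScan_eq_join (s : List Char) : altScan s = Jfun s := by
  induction s using altScan.induct with
  | case1 => unfold Jfun; simp [altScan, mySplit, fA]
  | case2 c rest hcond ih =>
    rw [altScan]
    rw [if_pos hcond]
    have hdecomp : c :: rest = ['.', 'j', 'a', 'v', 'a'] ++ rest.drop 4 := by
      conv_lhs => rw [← List.take_append_drop 5 (c :: rest)]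
      rw [hcond.1]
      simp
    rw [ih, hdecomp, J_java (rest.drop 4) (by
      rcases hcond.2 with h | h
      · left; exact h
      · right; exact h)]
  | case3 c rest hcond ih =>
    rw [altScan, if_neg hcond, ih]
    by_cases hc : c = ' '
    · subst hc; exact (J_space rest).symm
    · exact (J_cons c rest hc hcond).symm

theorem foldl_if_append {α β : Type} (P : α → Bool) (f g : α → β) (l : List α) (acc : List β) :
    l.foldl (fun acc inp => if P inp then acc ++ [f inp] else acc ++ [g inp]) acc =
      acc ++ l.map (fun inp => if P inp then f inp else g inp) := by
  induction l generalizing acc with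
  | nil => simp
  | cons x xs ih =>
    simp only [List.foldl_cons, List.map_cons]
    by_cases hp : P x
    · rw [if_pos hp, ih, if_pos hp]; simp
    · rw [if_neg hp, ih, if_neg hp]; simp

theorem fStr_toList (t : List Char) :
    (if PySem.Str.endswith (String.ofList t) ".java" then
        PySem.Str.slice (String.ofList t) none (some (-5))
      else String.ofList t).toList = fA t := by
  by_cases he : PySem.Chars.endswith t ['.', 'j', 'a', 'v', 'a'] = true
  · have : PySem.Str.endswith (String.ofList t) ".java" = true := by
      unfold PySem.Str.endswith
      simpa using he
    rw [if_pos this]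
    unfold PySem.Str.slice fA
    rw [if_pos he]
    simp only [String.toList_ofList, PySem.Chars.slice_eq_listSlice]
    rw [PySem.List.slice_to_neg_ofNat t 5 (by omega)]
  · have hfalse : PySem.Chars.endswith t ['.', 'j', 'a', 'v', 'a'] = false := by
      simpa using he
    rw [if_neg (by simp [PySem.Str.endswith, hfalse])]
    unfold fA
    rw [if_neg he]
    simp

theorem main_eq (s : String) : remove_java_extension s = remove_java_extension_alt s := by
  unfold remove_java_extension remove_java_extension_alt
  have hsplit : PySem.Str.split? s " " =
      some ((PySem.Chars.splitOn s.toList [' ']).map String.ofList) := by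
    unfold PySem.Str.split? PySem.Chars.split?
    simp
  rw [hsplit]
  simp only [Option.getD_some]
  rw [foldl_if_append]
  simp only [List.nil_append]
  unfold PySem.Str.join
  rw [altScan_eq_join, splitOn_eq_mySplit]
  congr 1
  unfold Jfun
  rw [List.map_map, List.map_map, show (" " : String).toList = [' '] from by decide]
  congr 1
  apply List.map_congr_left
  intro t _
  simpa [Function.comp] using fStr_toList t

-- ===== VERDICT (by name: the statement is the Claim_ definition above) =====
theorem remove_java_extension_spec : Claim_equal_remove_java_extension := by
  intro s _
  exact main_eq s
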